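-- pv_equiv track=rewrite | github.com/galaxy821/Algorithm | search/pg/pg_72079.py | solution
-- ===== SOURCE A (Python) =====
-- def solution(stones, k):
--     start, end = min(stones), max(stones)
--
--     answer = 0
--
--     while start <= end:
--         mid = (start + end) // 2
--
--         n = 0
--         for stone in stones:
--             if stone - mid >= 0:
--                 n = 0
--             else:
--                 n += 1
--
--             if n >= k:
--                 break
--
--         if n >= k:
--             end = mid - 1
--
--         else:
--             answer = max(answer, mid)
--             start = mid + 1
--
--     return answer
-- ===== SOURCE B (Python) =====
-- def solution(stones, k):
--     # answer = max(0, min over every window of k consecutive stones of that window's max),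
--     # window maxima via a monotonic deque (indices with strictly decreasing values)
--     n = len(stones)
--     if k < 1:
--         return 0
--     if k > n:
--         return max(0, max(stones))
--     best = None
--     dq = []   # indices in window, values strictly decreasing; dq[head] is the window argmax
--     head = 0
--     for i in range(n):
--         s = stones[i]
--         while len(dq) > head and stones[dq[-1]] <= s:
--             dq.pop()
--         dq.append(i)
--         if dq[head] <= i - k:
--             head += 1
--         if i >= k - 1:
--             wmax = stones[dq[head]]
--             if best is None or wmax < best:
--                 best = wmax
--     return max(0, best)
-- ===== Notes on version B (the rewrite author's own statement) =====
-- stated objective: faster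
-- what changed: Replaces A's binary search over the jump height (each probe rescanning all stones for a run of k submerged ones) by a single sliding-window pass: the answer is max(0, min over every window of k consecutive stones of that window's maximum), with window maxima maintained by a monotonic deque.
import Mathlib
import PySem

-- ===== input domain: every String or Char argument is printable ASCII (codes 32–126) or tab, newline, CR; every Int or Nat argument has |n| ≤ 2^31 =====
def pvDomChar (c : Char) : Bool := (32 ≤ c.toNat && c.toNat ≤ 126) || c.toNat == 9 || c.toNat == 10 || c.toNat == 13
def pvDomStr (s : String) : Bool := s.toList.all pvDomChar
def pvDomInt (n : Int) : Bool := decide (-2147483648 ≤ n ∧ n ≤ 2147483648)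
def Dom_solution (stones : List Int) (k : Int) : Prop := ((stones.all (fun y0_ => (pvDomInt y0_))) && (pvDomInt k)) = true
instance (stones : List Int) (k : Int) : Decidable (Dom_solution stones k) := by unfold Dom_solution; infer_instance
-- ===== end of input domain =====

-- B replaces A's binary search over the jump height (with a linear run-scan per probe) by a single
-- sliding-window pass: the answer is max(0, min over every window of k consecutive stones of that
-- window's max), with window maxima maintained by a monotonic deque. Objective: faster (O(n) vs O(n log M)).

-- ===== PORT A =====
-- the inner 'for stone in stones' loop: n counts the current run of submerged stones, breaking at n ≥ k
def goRun : List Int → Int → Int → Int → Int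
  | [], _, _, n => n
  | s :: rest, k, mid, n =>
    let n' := if s - mid ≥ 0 then 0 else n + 1
    if n' ≥ k then n' else goRun rest k mid n'

-- the 'while start <= end' binary-search loop
def bsearch (stones : List Int) (k : Int) (start stop answer : Int) : Int :=
  if h : start ≤ stop then
    let mid := PySem.Int.floordiv (start + stop) 2
    if k ≤ goRun stones k mid 0 then bsearch stones k start (mid - 1) answer
    else bsearch stones k (mid + 1) stop (max answer mid)
  else answer
termination_by (stop + 1 - start).toNat
decreasing_by
  · have := PySem.Int.floordiv_two_mid_bounds h; omega
  · have := PySem.Int.floordiv_two_mid_bounds h; omega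

def solution (stones : List Int) (k : Int) : Int :=
  -- Python's min(stones)/max(stones) raise ValueError on []; Pre_ excludes that, the 0 branch is unreachable
  match PySem.List.min? stones (fun x => x), PySem.List.max? stones (fun x => x) with
  | some lo, some hi => bsearch stones k lo hi 0
  | _, _ => 0

-- ===== PORT B =====
-- the inner 'while len(dq) > head and stones[dq[-1]] <= s: dq.pop()' loop
def popLoop (stones : List Int) (s head : Int) (dq : List Int) : List Int :=
  if h : dq ≠ [] ∧ head < (dq.length : Int) ∧ PySem.List.pyGetD stones (dq.getLastD 0) 0 ≤ s then
    popLoop stones s head dq.dropLast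
  else dq
termination_by dq.length
decreasing_by
  have := List.length_pos_of_ne_nil h.1
  simp [List.length_dropLast]; omega

-- one iteration of the 'for i in range(n)' loop over the state (dq, head, best)
def swStep (stones : List Int) (k : Int) (st : List Int × Int × Option Int) (i : Int) :
    List Int × Int × Option Int :=
  let dq0 := st.1
  let head0 := st.2.1
  let best0 := st.2.2
  let s := PySem.List.pyGetD stones i 0
  let dq1 := popLoop stones s head0 dq0
  let dq2 := dq1 ++ [i]
  let head1 := if PySem.List.pyGetD dq2 head0 0 ≤ i - k then head0 + 1 else head0
  let best1 :=
    if i ≥ k - 1 then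
      let wmax := PySem.List.pyGetD stones (PySem.List.pyGetD dq2 head1 0) 0
      match best0 with
      | none => some wmax
      | some b => if wmax < b then some wmax else some b
    else best0
  (dq2, head1, best1)

def solution_alt (stones : List Int) (k : Int) : Int :=
  let n : Int := stones.length
  if k < 1 then 0
  else if k > n then max 0 ((PySem.List.max? stones (fun x => x)).getD 0)
  else
    let st := (PySem.List.pyRange 0 n 1).foldl (swStep stones k) ([], 0, none)
    max 0 (st.2.2.getD 0)

-- ===== PRECONDITION & SPEC =====
-- Pre_ excludes only the empty stones list, on which Python's min(stones) raises ValueError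
def Pre_solution (stones : List Int) (k : Int) : Prop := stones ≠ []
instance (stones : List Int) (k : Int) : Decidable (Pre_solution stones k) := by unfold Pre_solution; infer_instance
def pvWitness_solution : List Int × Int := ([2, 4, 5, 3, 2, 1, 4, 2, 5, 1], 2)

def Spec_solution (stones : List Int) (k : Int) (out : Int) : Prop := out = solution_alt stones k
instance (stones : List Int) (k : Int) (out : Int) : Decidable (Spec_solution stones k out) := by unfold Spec_solution; infer_instance

-- ===== CLAIM (what is proved, stated in full; the proofs are below) =====
def Claim_equal_solution : Prop := ∀ (stones : List Int) (k : Int), Dom_solution stones k → Pre_solution stones k → Spec_solution stones k (solution stones k)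

-- ===== LEMMAS AND PROOFS =====

-- ---- B-side: deque correctness ----
def valI (stones : List Int) (j : Int) : Int := PySem.List.pyGetD stones j 0

theorem popLoop_spec (stones : List Int) (s : Int) (act pre : List Int)
    (hdec : act.Pairwise (fun a b => valI stones b < valI stones a)) :
    popLoop stones s (pre.length : Int) (pre ++ act) =
      pre ++ act.takeWhile (fun j => decide (s < valI stones j)) := by
  induction act using List.reverseRecOn with
  | nil =>
    rw [popLoop, dif_neg]
    · simp
    · rintro ⟨_, h1, _⟩; simp at h1
  | append_singleton act a ih =>
    have hlast : ((pre ++ (act ++ [a])).getLastD 0) = a := by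
      rw [show pre ++ (act ++ [a]) = (pre ++ act) ++ [a] by simp]
      simp
    rw [popLoop]
    by_cases hva : valI stones a ≤ s
    · rw [dif_pos ⟨by simp, by simp, by rw [hlast]; exact hva⟩]
      rw [show (pre ++ (act ++ [a])).dropLast = pre ++ act by
        rw [show pre ++ (act ++ [a]) = (pre ++ act) ++ [a] by simp, List.dropLast_concat]]
      rw [ih (hdec.sublist (List.sublist_append_left act [a]))]
      congr 1
      rw [List.takeWhile_append]
      split_ifs with hall
      · have heq : List.takeWhile (fun j => decide (s < valI stones j)) act = act :=
          (List.takeWhile_prefix _).eq_of_length hall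
        rw [heq]
        simp only [List.takeWhile_cons]
        rw [if_neg (by simpa using hva), List.append_nil]
      · rfl
    · rw [dif_neg (by rw [hlast]; rintro ⟨_, _, h⟩; exact hva h)]
      have hall : ∀ x ∈ act ++ [a], s < valI stones x := by
        intro x hx
        rcases List.mem_append.mp hx with hx | hx
        · have := (List.pairwise_append.mp hdec).2.2 x hx a (by simp)
          omega
        · simp at hx; subst hx; omega
      rw [List.takeWhile_eq_self_iff.mpr (by intro x hx; simpa using hall x hx)]
def valN (stones : List Int) (j : ℕ) : Int := stones.getD j 0

def Dq (stones : List Int) (K c : ℕ) : List ℕ :=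
  (List.range c).filter
    (fun j => decide (c ≤ j + K) && decide (∀ j' < c, j < j' → valN stones j' < valN stones j))

theorem mem_Dq (stones : List Int) (K c j : ℕ) :
    j ∈ Dq stones K c ↔ j < c ∧ c ≤ j + K ∧ ∀ j' < c, j < j' → valN stones j' < valN stones j := by
  simp only [Dq, List.mem_filter, List.mem_range, Bool.and_eq_true, decide_eq_true_eq]

theorem Dq_lt (stones : List Int) (K c : ℕ) : (Dq stones K c).Pairwise (· < ·) :=
  List.Pairwise.sublist List.filter_sublist List.pairwise_lt_range

theorem Dq_val_dec (stones : List Int) (K c : ℕ) :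
    (Dq stones K c).Pairwise (fun a b => valN stones b < valN stones a) := by
  rw [List.pairwise_iff_forall_sublist]
  intro a b hs
  have hab := List.pairwise_iff_forall_sublist.mp (Dq_lt stones K c) hs
  have hb : b ∈ Dq stones K c := hs.subset (by simp)
  have ha : a ∈ Dq stones K c := hs.subset (by simp)
  rw [mem_Dq] at ha hb
  exact ha.2.2 b hb.1 hab

theorem self_mem_Dq (stones : List Int) (K c : ℕ) (hK : 1 ≤ K) : c ∈ Dq stones K (c + 1) := by
  rw [mem_Dq]
  exact ⟨by omega, by omega, fun j' h1 h2 => by omega⟩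

-- takeWhile = filter on a strictly value-decreasing list
theorem takeWhile_eq_filter_of_dec (stones : List Int) (s : Int) (l : List ℕ)
    (hdec : l.Pairwise (fun a b => valN stones b < valN stones a)) :
    l.takeWhile (fun j => decide (s < valN stones j)) =
      l.filter (fun j => decide (s < valN stones j)) := by
  induction l with
  | nil => rfl
  | cons x t ih =>
    rw [List.pairwise_cons] at hdec
    by_cases hx : s < valN stones x
    · simp only [List.takeWhile_cons, List.filter_cons, decide_eq_true hx, if_pos rfl]
      simp only [ih hdec.2]
      rfl
    · simp only [List.takeWhile_cons, List.filter_cons]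
      rw [decide_eq_false hx]
      simp only [Bool.false_eq_true, if_false, cond_false]
      symm
      rw [List.filter_eq_nil_iff]
      intro a ha
      have := hdec.1 a ha
      simp only [decide_eq_true_eq]
      intro hc
      omega

-- transition: Dq (c+1) before the window trim
theorem Dq_succ (stones : List Int) (K c : ℕ) (hK : 1 ≤ K) :
    Dq stones K (c + 1) =
      ((Dq stones K c).filter
        (fun j => decide (c + 1 ≤ j + K) && decide (valN stones c < valN stones j))) ++ [c] := by
  unfold Dq
  rw [List.range_succ, List.filter_append]
  congr 1
  · rw [List.filter_filter]
    apply List.filter_congr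
    intro j hj
    rw [List.mem_range] at hj
    rw [Bool.eq_iff_iff]
    simp only [Bool.and_eq_true, decide_eq_true_eq]
    constructor
    · rintro ⟨h1, h2⟩
      exact ⟨⟨h1, h2 c (by omega) hj⟩, by omega, fun j' hj' hlt => h2 j' (by omega) hlt⟩
    · rintro ⟨⟨h1, hc⟩, h3, h4⟩
      refine ⟨h1, fun j' hj' hlt => ?_⟩
      rcases Nat.lt_succ_iff_lt_or_eq.mp hj' with h | rfl
      · exact h4 j' h hlt
      · exact hc
  · rw [List.filter_cons_of_pos, List.filter_nil]
    simp only [Bool.and_eq_true, decide_eq_true_eq]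
    exact ⟨by omega, fun j' h1 h2 => by omega⟩
def wm (stones : List Int) (K j : ℕ) : Int :=
  (PySem.List.max? ((stones.drop j).take K) (fun x => x)).getD 0

theorem head_min (l : List ℕ) (hlt : l.Pairwise (· < ·)) (x : ℕ) (hx : x ∈ l) :
    l.headD 0 ≤ x := by
  cases l with
  | nil => simp at hx
  | cons a t =>
    rcases List.mem_cons.mp hx with rfl | hx
    · simp
    · exact le_of_lt ((List.pairwise_cons.mp hlt).1 x hx)

theorem headD_mem (l : List ℕ) (h : l ≠ []) : l.headD 0 ∈ l := by
  cases l with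
  | nil => exact absurd rfl h
  | cons a t => simp

-- window membership by index
theorem getD_mem_window (stones : List Int) (K j0 t : ℕ) (h1 : j0 ≤ t) (h2 : t < j0 + K)
    (h3 : j0 + K ≤ stones.length) : stones.getD t 0 ∈ (stones.drop j0).take K := by
  have hlen : ((stones.drop j0).take K).length = K := by
    rw [List.length_take, List.length_drop]; omega
  have hidx : t - j0 < ((stones.drop j0).take K).length := by omega
  have : ((stones.drop j0).take K)[t - j0] = stones.getD t 0 := by
    rw [List.getElem_take, List.getElem_drop]
    rw [List.getD_eq_getElem stones 0 (by omega)]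
    congr 1; omega
  exact this ▸ List.getElem_mem hidx

theorem window_exists_idx (stones : List Int) (K j0 : ℕ) (h3 : j0 + K ≤ stones.length)
    (m : Int) (hm : m ∈ (stones.drop j0).take K) :
    ∃ t, j0 ≤ t ∧ t < j0 + K ∧ stones.getD t 0 = m := by
  obtain ⟨i, hi, hget⟩ := List.mem_iff_getElem.mp hm
  have hlen : ((stones.drop j0).take K).length = K := by
    rw [List.length_take, List.length_drop]; omega
  refine ⟨j0 + i, by omega, by omega, ?_⟩
  rw [List.getD_eq_getElem stones 0 (by omega)]
  rw [List.getElem_take, List.getElem_drop] at hget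
  exact hget

-- the deque head after a completed window carries that window's max
theorem Dq_head_val (stones : List Int) (K c : ℕ) (hK : 1 ≤ K) (hKc : K ≤ c + 1)
    (hc : c < stones.length) :
    valN stones ((Dq stones K (c + 1)).headD 0) = wm stones K (c + 1 - K) := by
  set j0 := c + 1 - K with hj0
  have h3 : j0 + K ≤ stones.length := by omega
  have hwne : (stones.drop j0).take K ≠ [] := by
    intro hcon
    have := congrArg List.length hcon
    rw [List.length_take, List.length_drop] at this
    simp at this; omega
  cases hmx : PySem.List.max? ((stones.drop j0).take K) (fun x => x) with
  | none => exact absurd ((PySem.List.max?_eq_none_iff _ _).mp hmx) hwne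
  | some m =>
  have hm_mem := PySem.List.max?_mem hmx
  have hm_max := PySem.List.max?_isMax hmx
  have hub : ∀ t, j0 ≤ t → t < j0 + K → valN stones t ≤ m := by
    intro t ht1 ht2
    exact hm_max _ (getD_mem_window stones K j0 t ht1 ht2 h3)
  obtain ⟨t0, ht01, ht02, ht0v⟩ := window_exists_idx stones K j0 h3 m hm_mem
  set jM := Nat.findGreatest (fun t => j0 ≤ t ∧ valN stones t = m) c with hjM
  have hjM_spec : j0 ≤ jM ∧ valN stones jM = m :=
    Nat.findGreatest_spec (P := fun t => j0 ≤ t ∧ valN stones t = m) (by omega : t0 ≤ c) ⟨ht01, ht0v⟩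
  have hjM_le : jM ≤ c := Nat.findGreatest_le c
  have hjM_mem : jM ∈ Dq stones K (c + 1) := by
    rw [mem_Dq]
    refine ⟨by omega, by omega, fun j' hj' hlt => ?_⟩
    have hle : valN stones j' ≤ m := hub j' (by omega) (by omega)
    have hne : valN stones j' ≠ m := by
      intro hcon
      exact Nat.findGreatest_is_greatest hlt (by omega) ⟨by omega, hcon⟩
    rw [hjM_spec.2]; omega
  have hne : Dq stones K (c + 1) ≠ [] :=
    List.ne_nil_of_mem (self_mem_Dq stones K c hK)
  set h := (Dq stones K (c + 1)).headD 0 with hh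
  have hhmem : h ∈ Dq stones K (c + 1) := headD_mem _ hne
  have hhmin : h ≤ jM := head_min _ (Dq_lt stones K (c + 1)) jM hjM_mem
  have hhDq := (mem_Dq stones K (c + 1) h).mp hhmem
  have hval : valN stones h = m := by
    rcases Nat.lt_or_ge h jM with hlt | hge
    · exfalso
      have := hhDq.2.2 jM (by omega) hlt
      have hub_h : valN stones h ≤ m := hub h (by omega) (by omega)
      rw [hjM_spec.2] at this; omega
    · have : h = jM := by omega
      rw [this, hjM_spec.2]
  rw [hval]
  unfold wm
  rw [hmx, Option.getD_some]
-- the head-trim step: dropping the expired head of (T ++ [c]) yields Dq (c+1)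
theorem Dq_trim (stones : List Int) (K c : ℕ) (hK : 1 ≤ K) :
    Dq stones K (c + 1) =
      (if ((((Dq stones K c).filter (fun j => decide (valN stones c < valN stones j))) ++ [c]).headD 0) + K ≤ c
       then (((Dq stones K c).filter (fun j => decide (valN stones c < valN stones j))) ++ [c]).tail
       else ((Dq stones K c).filter (fun j => decide (valN stones c < valN stones j))) ++ [c]) := by
  set T := (Dq stones K c).filter (fun j => decide (valN stones c < valN stones j)) with hT
  have hTlt : T.Pairwise (· < ·) :=
    List.Pairwise.sublist List.filter_sublist (Dq_lt stones K c)
  have hTmem : ∀ j ∈ T, j < c ∧ c ≤ j + K ∧ valN stones c < valN stones j := by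
    intro j hj
    rw [hT, List.mem_filter, decide_eq_true_eq] at hj
    have := (mem_Dq stones K c j).mp hj.1
    exact ⟨this.1, this.2.1, hj.2⟩
  have hF : Dq stones K (c + 1) = (T.filter (fun j => decide (c + 1 ≤ j + K))) ++ [c] := by
    rw [Dq_succ stones K c hK, hT, List.filter_filter]
  cases hTc : T with
  | nil =>
    rw [hF, hTc]
    simp only [List.filter_nil, List.nil_append, List.headD_cons]
    rw [if_neg (by omega)]
  | cons t0 T' =>
    have ht0 := hTmem t0 (by rw [hTc]; simp)
    rw [hF, hTc]
    simp only [List.cons_append, List.headD_cons, List.filter_cons]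
    by_cases hexp : t0 + K ≤ c
    · rw [if_pos hexp]
      have ht0K : t0 + K = c := by omega
      rw [decide_eq_false (by omega : ¬ c + 1 ≤ t0 + K)]
      simp only [Bool.false_eq_true, if_false, List.tail_cons]
      congr 1
      rw [List.filter_eq_self]
      intro j hj
      have hj' : t0 < j := (List.pairwise_cons.mp (hTc ▸ hTlt)).1 j hj
      simp only [decide_eq_true_eq]
      omega
    · rw [if_neg hexp]
      rw [decide_eq_true (by omega : c + 1 ≤ t0 + K)]
      simp only [if_true]
      have hfe : List.filter (fun j => decide (c + 1 ≤ j + K)) T' = T' := by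
        rw [List.filter_eq_self]
        intro j hj
        have hj' : t0 < j := (List.pairwise_cons.mp (hTc ▸ hTlt)).1 j hj
        simp only [decide_eq_true_eq]
        omega
      rw [hfe]
      simp

def bestOf (stones : List Int) (K : ℕ) : ℕ → Int
  | 0 => wm stones K 0
  | t + 1 =>
    let b := bestOf stones K t
    let w := wm stones K (t + 1)
    if w < b then w else b

-- the min-of-window-maxes list, used to characterize A's feasibility threshold
def winMaxes (stones : List Int) (k : Int) : List Int :=
  (PySem.List.pyRange 0 ((stones.length : Int) - k + 1) 1).map
    (fun i => (PySem.List.max? (PySem.List.slice stones (some i) (some (i + k))) (fun x => x)).getD 0)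
-- glue helpers
theorem getD_append_len (pre L : List Int) (d : Int) : (pre ++ L).getD pre.length d = L.getD 0 d := by
  induction pre with
  | nil => simp
  | cons x t ih => simpa using ih

theorem map_cast_getD_zero (M : List ℕ) (hM : M ≠ []) :
    (M.map (fun j : ℕ => (j : Int))).getD 0 0 = ((M.headD 0 : ℕ) : Int) := by
  cases M with
  | nil => exact absurd rfl hM
  | cons a t => simp

theorem valI_cast (stones : List Int) (j : ℕ) : valI stones (j : Int) = valN stones j := by
  simp [valI, valN, PySem.List.pyGetD_natCast]

-- the master invariant
theorem sw_inv (stones : List Int) (k : Int) (K : ℕ) (hk : k = (K : Int)) (hK : 1 ≤ K)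
    (hKn : K ≤ stones.length) :
    ∀ c : ℕ, c ≤ stones.length →
    ∃ pre : List Int,
      (PySem.List.pyRange 0 (c : Int) 1).foldl (swStep stones k) ([], 0, none) =
        (pre ++ (Dq stones K c).map (fun j : ℕ => (j : Int)), (pre.length : Int),
         if c < K then none else some (bestOf stones K (c - K))) := by
  intro c
  induction c with
  | zero =>
    intro _
    refine ⟨[], ?_⟩
    rw [show ((0:ℕ) : Int) = 0 by rfl, PySem.List.pyRange_one_eq_nil le_rfl]
    simp [Dq, if_pos (by omega : 0 < K)]
  | succ c ih =>
    intro hc1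
    obtain ⟨pre, heq⟩ := ih (by omega)
    rw [show ((c + 1 : ℕ) : Int) = (c : Int) + 1 by push_cast; ring,
      PySem.List.pyRange_one_succ_right (by positivity), List.foldl_append, heq]
    -- now compute one step
    simp only [List.foldl_cons, List.foldl_nil]
    set M := (Dq stones K c).map (fun j : ℕ => (j : Int)) with hM
    set T := (Dq stones K c).filter (fun j => decide (valN stones c < valN stones j)) with hTdef
    have hs : PySem.List.pyGetD stones (c : Int) 0 = valN stones c :=
      PySem.List.pyGetD_natCast stones c 0
    have hMdec : M.Pairwise (fun a b => valI stones b < valI stones a) := by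
      rw [hM, List.pairwise_map]
      have := Dq_val_dec stones K c
      refine this.imp_of_mem ?_
      intro a b _ _ hab
      rw [valI_cast, valI_cast]
      exact hab
    have hpop : popLoop stones (valN stones c) (pre.length : Int) (pre ++ M) =
        pre ++ T.map (fun j : ℕ => (j : Int)) := by
      rw [popLoop_spec stones (valN stones c) M pre hMdec, hM, List.takeWhile_map]
      congr 1
      rw [show ((fun j => decide (valN stones c < valI stones j)) ∘ (fun j : ℕ => (j : Int)))
            = (fun j : ℕ => decide (valN stones c < valN stones j)) from
          funext fun j => by simp [Function.comp, valI_cast]]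
      rw [takeWhile_eq_filter_of_dec stones (valN stones c) _ (Dq_val_dec stones K c)]
    have hTc_ne : T ++ [c] ≠ [] := by simp
    have cons_headD_tail : ∀ l : List ℕ, l ≠ [] → l.headD 0 :: l.tail = l := by
      intro l hl; cases l with
      | nil => exact absurd rfl hl
      | cons a t => simp
    set h0 := (T ++ [c]).headD 0 with hh0
    have hget0 : PySem.List.pyGetD (pre ++ T.map (fun j : ℕ => (j : Int)) ++ [(c:Int)])
        ((pre.length : Int)) 0 = (h0 : Int) := by
      rw [List.append_assoc]
      rw [show ([((c:Int))] : List Int) = [c].map (fun j : ℕ => (j : Int)) by simp]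
      rw [← List.map_append]
      rw [PySem.List.pyGetD_natCast, getD_append_len, map_cast_getD_zero _ hTc_ne]
    have hdq2 : pre ++ T.map (fun j : ℕ => (j : Int)) ++ [(c:Int)]
        = pre ++ ((T ++ [c]).map (fun j : ℕ => (j : Int))) := by
      rw [List.map_append, ← List.append_assoc]; simp
    unfold swStep
    simp only [hs, hpop, hget0]
    have hDne : Dq stones K (c + 1) ≠ [] :=
      List.ne_nil_of_mem (self_mem_Dq stones K c hK)
    by_cases htrim : h0 + K ≤ c
    · -- the old window head expired: head advances past it
      rw [if_pos (show (h0 : Int) ≤ (c : Int) - k by rw [hk]; push_cast; omega)]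
      have hD : Dq stones K (c + 1) = (T ++ [c]).tail := by
        rw [Dq_trim stones K c hK, ← hTdef, ← hh0, if_pos htrim]
      have hmapsplit : List.map (fun j : ℕ => (j : Int)) (T ++ [c])
          = (h0 : Int) :: List.map (fun j : ℕ => (j : Int)) ((T ++ [c]).tail) := by
        conv_lhs => rw [← cons_headD_tail (T ++ [c]) hTc_ne]
        rw [List.map_cons, ← hh0]
      have hsplit : pre ++ List.map (fun j : ℕ => (j : Int)) T ++ [(c : Int)]
          = (pre ++ [(h0 : Int)]) ++ List.map (fun j : ℕ => (j : Int)) (Dq stones K (c + 1)) := by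
        rw [hdq2, hD, hmapsplit]
        simp
      have hlen' : (pre.length : Int) + 1 = (((pre ++ [(h0 : Int)]).length : ℕ) : Int) := by
        simp
      refine ⟨pre ++ [(h0 : Int)], ?_⟩
      rw [hsplit, hlen']
      refine Prod.ext rfl (Prod.ext rfl ?_)
      simp only []
      -- best component
      have hget1 : PySem.List.pyGetD
          ((pre ++ [(h0 : Int)]) ++ List.map (fun j : ℕ => (j : Int)) (Dq stones K (c + 1)))
          (((pre ++ [(h0 : Int)]).length : ℕ) : Int) 0
          = ((Dq stones K (c + 1)).headD 0 : Int) := by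
        rw [PySem.List.pyGetD_natCast, getD_append_len, map_cast_getD_zero _ hDne]
      by_cases hbK : c + 1 < K
      · rw [if_neg (show ¬ ((c : Int) ≥ k - 1) by rw [hk]; push_cast; omega)]
        rw [if_pos (show c < K by omega), if_pos hbK]
      · rw [if_pos (show (c : Int) ≥ k - 1 by rw [hk]; push_cast; omega)]
        have hwv : PySem.List.pyGetD stones (((Dq stones K (c + 1)).headD 0 : ℕ) : Int) 0
            = wm stones K (c + 1 - K) := by
          rw [PySem.List.pyGetD_natCast]
          exact Dq_head_val stones K c hK (by omega) (by omega)
        rw [if_neg hbK, hget1, hwv]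
        by_cases hcK : c < K
        · rw [if_pos hcK]
          rw [show c + 1 - K = 0 by omega]
          rfl
        · rw [if_neg hcK]
          rw [show c + 1 - K = (c - K) + 1 by omega]
          simp only [bestOf]
          split_ifs <;> rfl
    · -- no head advance: the whole popped deque is the new window deque
      rw [if_neg (show ¬ ((h0 : Int) ≤ (c : Int) - k) by rw [hk]; omega)]
      have hD : Dq stones K (c + 1) = T ++ [c] := by
        rw [Dq_trim stones K c hK, ← hTdef, ← hh0, if_neg htrim]
      have hsplit : pre ++ List.map (fun j : ℕ => (j : Int)) T ++ [(c : Int)]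
          = pre ++ List.map (fun j : ℕ => (j : Int)) (Dq stones K (c + 1)) := by
        rw [hdq2, hD]
      refine ⟨pre, ?_⟩
      rw [hsplit]
      refine Prod.ext rfl (Prod.ext rfl ?_)
      simp only []
      have hget1 : PySem.List.pyGetD
          (pre ++ List.map (fun j : ℕ => (j : Int)) (Dq stones K (c + 1)))
          ((pre.length : ℕ) : Int) 0
          = ((Dq stones K (c + 1)).headD 0 : Int) := by
        rw [PySem.List.pyGetD_natCast, getD_append_len, map_cast_getD_zero _ hDne]
      by_cases hbK : c + 1 < K
      · rw [if_neg (show ¬ ((c : Int) ≥ k - 1) by rw [hk]; omega)]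
        rw [if_pos (show c < K by omega), if_pos hbK]
      · rw [if_pos (show (c : Int) ≥ k - 1 by rw [hk]; omega)]
        have hwv : PySem.List.pyGetD stones (((Dq stones K (c + 1)).headD 0 : ℕ) : Int) 0
            = wm stones K (c + 1 - K) := by
          rw [PySem.List.pyGetD_natCast]
          exact Dq_head_val stones K c hK (by omega) (by omega)
        rw [if_neg hbK, hget1, hwv]
        by_cases hcK : c < K
        · rw [if_pos hcK]
          rw [show c + 1 - K = 0 by omega]
          rfl
        · rw [if_neg hcK]
          rw [show c + 1 - K = (c - K) + 1 by omega]
          simp only [bestOf]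
          split_ifs <;> rfl
theorem winMaxes_eq (stones : List Int) (k : Int) (hk1 : 1 ≤ k) (hkn : k ≤ (stones.length : Int)) :
    winMaxes stones k =
      (List.range (stones.length - k.toNat + 1)).map (fun j => wm stones k.toNat j) := by
  unfold winMaxes
  rw [PySem.List.pyRange_one, List.map_map]
  rw [show (((stones.length : Int) - k + 1) - 0).toNat = stones.length - k.toNat + 1 by omega]
  apply List.map_congr_left
  intro j _
  simp only [Function.comp]
  rw [show ((0 : Int) + (j : Int)) = (j : Int) by omega,
    show (j : Int) + k = (j : Int) + (k.toNat : Int) by omega,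
    PySem.List.slice_natCast_add]
  rfl

theorem bestOf_eq_foldl (stones : List Int) (K : ℕ) : ∀ t : ℕ,
    bestOf stones K t = ((List.range t).map (fun j => wm stones K (j + 1))).foldl min (wm stones K 0) := by
  intro t
  induction t with
  | zero => rfl
  | succ t ih =>
    rw [List.range_succ, List.map_append, List.foldl_append, ← ih]
    simp only [List.map_cons, List.map_nil, List.foldl_cons, List.foldl_nil, bestOf]
    rcases lt_or_ge (wm stones K (t + 1)) (bestOf stones K t) with h | h
    · rw [if_pos h, min_eq_right (le_of_lt h)]
    · rw [if_neg (by omega), min_eq_left h]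

theorem min_winMaxes_getD (stones : List Int) (k : Int) (hk1 : 1 ≤ k)
    (hkn : k ≤ (stones.length : Int)) :
    (PySem.List.min? (winMaxes stones k) (fun x => x)).getD 0 =
      bestOf stones k.toNat (stones.length - k.toNat) := by
  rw [winMaxes_eq stones k hk1 hkn, List.range_succ_eq_map, List.map_cons, List.map_map]
  rw [PySem.List.min?_id_cons, Option.getD_some]
  rw [bestOf_eq_foldl]
  congr 1

theorem alt_eq (stones : List Int) (k : Int) (hk1 : 1 ≤ k) (hkn : k ≤ (stones.length : Int)) :
    solution_alt stones k = max 0 ((PySem.List.min? (winMaxes stones k) (fun x => x)).getD 0) := by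
  unfold solution_alt
  rw [if_neg (show ¬ k < 1 by omega), if_neg (show ¬ k > (stones.length : Int) by omega)]
  obtain ⟨pre, heq⟩ := sw_inv stones k k.toNat (by omega) (by omega) (by omega) stones.length le_rfl
  rw [heq]
  simp only []
  rw [if_neg (show ¬ stones.length < k.toNat by omega), Option.getD_some]
  rw [min_winMaxes_getD stones k hk1 hkn]

-- ---- A-side: binary-search characterization ----

-- 'prefixRun xs mid r': xs starts with a run of at least r stones strictly below mid
def prefixRun : List Int → Int → Int → Prop
  | [], _, r => r ≤ 0
  | x :: t, mid, r => r ≤ 0 ∨ (x < mid ∧ prefixRun t mid (r - 1))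

-- 'Bad xs mid k': somewhere in xs there are k consecutive stones strictly below mid
def Bad : List Int → Int → Int → Prop
  | [], _, _ => False
  | x :: t, mid, k => prefixRun (x :: t) mid k ∨ Bad t mid k

theorem prefixRun_nonpos (xs : List Int) (mid r : Int) (h : r ≤ 0) : prefixRun xs mid r := by
  cases xs <;> simp [prefixRun, h]

theorem prefixRun_mono (xs : List Int) (mid : Int) : ∀ r r' : Int, r' ≤ r →
    prefixRun xs mid r → prefixRun xs mid r' := by
  induction xs with
  | nil => intro r r' h hr; simp only [prefixRun] at *; omega
  | cons x t ih =>
    intro r r' h hr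
    rcases hr with hr | ⟨hx, hr⟩
    · exact Or.inl (le_trans h hr)
    · exact Or.inr ⟨hx, ih _ _ (by omega) hr⟩

theorem prefixRun_bad (xs : List Int) (mid k : Int) (hk : 1 ≤ k)
    (h : prefixRun xs mid k) : Bad xs mid k := by
  cases xs with
  | nil => simp only [prefixRun] at h; omega
  | cons x t => exact Or.inl h

-- A's inner loop reaches k exactly when the pending run completes or a full bad window exists
theorem goRun_char (mid k : Int) (hk : 1 ≤ k) : ∀ (xs : List Int) (n : Int), 0 ≤ n → n < k →
    (k ≤ goRun xs k mid n ↔ prefixRun xs mid (k - n) ∨ Bad xs mid k) := by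
  intro xs
  induction xs with
  | nil =>
    intro n h0 hn
    simp only [goRun, Bad, prefixRun]
    constructor
    · intro h; exact absurd h (by omega)
    · rintro (h | h)
      · exact absurd h (by omega)
      · exact h.elim
  | cons x t ih =>
    intro n h0 hn
    simp only [goRun]
    by_cases hx : x - mid ≥ 0
    · simp only [if_pos hx, if_neg (show ¬ ((0:Int) ≥ k) by omega)]
      have iH := ih 0 le_rfl (by omega)
      rw [show k - (0:Int) = k by ring] at iH
      rw [iH]
      have hpr1 : ¬ prefixRun (x :: t) mid (k - n) := by
        intro hp
        rcases hp with h | ⟨h, _⟩ <;> omega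
      have hpr2 : ¬ prefixRun (x :: t) mid k := by
        intro hp
        rcases hp with h | ⟨h, _⟩ <;> omega
      constructor
      · rintro (h | h)
        · exact Or.inr (Or.inr (prefixRun_bad t mid k hk h))
        · exact Or.inr (Or.inr h)
      · rintro (h | h | h)
        · exact absurd h hpr1
        · exact absurd h hpr2
        · exact Or.inr h
    · simp only [if_neg hx]
      by_cases hnk : n + 1 ≥ k
      · simp only [if_pos hnk]
        constructor
        · intro _
          exact Or.inl (Or.inr ⟨by omega, prefixRun_nonpos _ _ _ (by omega)⟩)
        · intro _; omega
      · simp only [if_neg hnk]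
        have iH := ih (n + 1) (by omega) (by omega)
        rw [show k - (n + 1) = k - n - 1 by ring] at iH
        rw [iH]
        constructor
        · rintro (h | h)
          · exact Or.inl (Or.inr ⟨by omega, h⟩)
          · exact Or.inr (Or.inr h)
        · rintro ((h | ⟨_, h⟩) | (h | ⟨_, h⟩) | h)
          · omega
          · exact Or.inl h
          · omega
          · exact Or.inl (prefixRun_mono t mid (k - 1) (k - n - 1) (by omega) h)
          · exact Or.inr h

-- with k ≤ 0 the loop breaks ≥ k at the first stone
theorem goRun_nonpos (k mid : Int) (hk : k ≤ 0) (x : Int) (t : List Int) :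
    k ≤ goRun (x :: t) k mid 0 := by
  simp only [goRun]
  by_cases hx : x - mid ≥ 0
  · simp only [if_pos hx, if_pos (show (0:Int) ≥ k by omega)]; omega
  · simp only [if_neg hx, if_pos (show (0:Int) + 1 ≥ k by omega)]; omega

-- with fewer than k stones left to scan the loop can never reach k
theorem goRun_short (k mid : Int) : ∀ (xs : List Int) (n : Int), 0 ≤ n →
    (n : Int) + xs.length < k → goRun xs k mid n < k := by
  intro xs
  induction xs with
  | nil => intro n h0 h; simpa [goRun] using (by simpa using h)
  | cons x t ih =>
    intro n h0 h
    simp only [List.length_cons] at h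
    simp only [goRun]
    by_cases hx : x - mid ≥ 0
    · simp only [if_pos hx, if_neg (show ¬ ((0:Int) ≥ k) by push_cast at h; omega)]
      exact ih 0 le_rfl (by push_cast at h ⊢; omega)
    · simp only [if_neg hx, if_neg (show ¬ (n + 1 ≥ k) by push_cast at h; omega)]
      exact ih (n + 1) (by omega) (by push_cast at h ⊢; omega)

theorem prefixRun_iff_take (mid : Int) : ∀ (xs : List Int) (K : ℕ),
    (prefixRun xs mid (K : Int) ↔ K ≤ xs.length ∧ ∀ y ∈ xs.take K, y < mid) := by
  intro xs
  induction xs with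
  | nil =>
    intro K
    simp only [prefixRun, List.take_nil, List.length_nil]
    constructor
    · intro h; exact ⟨by omega, by simp⟩
    · intro ⟨h, _⟩; omega
  | cons x t ih =>
    intro K
    cases K with
    | zero => simp [prefixRun]
    | succ m =>
      have hK : ¬ ((m + 1 : ℕ) : Int) ≤ 0 := by omega
      simp only [prefixRun, hK, false_or,
        show ((m + 1 : ℕ) : Int) - 1 = (m : Int) by omega, ih m,
        List.take_succ_cons, List.length_cons, List.mem_cons]
      constructor
      · rintro ⟨hx, hm, hall⟩
        exact ⟨by omega, fun y hy => by rcases hy with rfl | hy; exact hx; exact hall y hy⟩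
      · rintro ⟨hlen, hall⟩
        exact ⟨hall x (Or.inl rfl), by omega, fun y hy => hall y (Or.inr hy)⟩

-- a bad stretch of k exists iff some window stones[j:j+k] is entirely below mid
theorem bad_iff (mid k : Int) (hk : 1 ≤ k) : ∀ xs : List Int,
    (Bad xs mid k ↔ ∃ j : ℕ, (j : Int) + k ≤ xs.length ∧ ∀ y ∈ (xs.drop j).take k.toNat, y < mid) := by
  intro xs
  induction xs with
  | nil =>
    simp only [Bad, List.drop_nil, List.take_nil, List.length_nil]
    constructor
    · exact False.elim
    · rintro ⟨j, hj, _⟩; omega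
  | cons x t ih =>
    simp only [Bad, ih]
    have hcast : k = (k.toNat : Int) := by omega
    constructor
    · rintro (h | ⟨j, hj, hall⟩)
      · rw [hcast] at h
        have h' := (prefixRun_iff_take mid (x :: t) k.toNat).mp h
        refine ⟨0, ?_, by simpa using h'.2⟩
        have h1 := h'.1
        simp only [List.length_cons] at h1 ⊢
        omega
      · exact ⟨j + 1, by push_cast; simp only [List.length_cons]; omega,
          by simpa [List.drop_succ_cons] using hall⟩
    · rintro ⟨j, hj, hall⟩
      cases j with
      | zero =>
        left
        rw [hcast]
        refine (prefixRun_iff_take mid (x :: t) k.toNat).mpr ⟨?_, ?_⟩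
        · simp only [List.length_cons] at hj ⊢; omega
        · simpa using hall
      | succ m =>
        right
        refine ⟨m, ?_, ?_⟩
        · simp only [List.length_cons] at hj; push_cast at hj ⊢; omega
        · simpa [List.drop_succ_cons] using hall

-- the max of a full window: it is a stone of xs and gates 'all below mid'
theorem window_max (xs : List Int) (k : Int) (hk : 1 ≤ k) (j : ℕ) (hj : (j : Int) + k ≤ xs.length) :
    ∃ m, PySem.List.max? ((xs.drop j).take k.toNat) (fun x => x) = some m ∧ m ∈ xs ∧
      ∀ mid : Int, ((∀ y ∈ (xs.drop j).take k.toNat, y < mid) ↔ m < mid) := by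
  set w := (xs.drop j).take k.toNat with hw
  have hlen : w.length = k.toNat := by
    rw [hw, List.length_take, List.length_drop]; omega
  have hne : w ≠ [] := by
    intro hc; rw [hc] at hlen; simp at hlen; omega
  cases hmx : PySem.List.max? w (fun x => x) with
  | none => exact absurd ((PySem.List.max?_eq_none_iff w (fun x => x)).mp hmx) hne
  | some m =>
    have hmem : m ∈ w := PySem.List.max?_mem hmx
    have hmax := PySem.List.max?_isMax hmx
    refine ⟨m, rfl, ?_, ?_⟩
    · exact List.mem_of_mem_drop (List.mem_of_mem_take hmem)
    · intro mid
      constructor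
      · intro hall; exact hall m hmem
      · intro hm y hy; exact lt_of_le_of_lt (hmax y hy) hm

theorem mem_winMaxes (stones : List Int) (k : Int) (hk : 1 ≤ k) (w : Int) :
    w ∈ winMaxes stones k ↔ ∃ j : ℕ, (j : Int) + k ≤ stones.length ∧
      w = (PySem.List.max? ((stones.drop j).take k.toNat) (fun x => x)).getD 0 := by
  unfold winMaxes
  rw [PySem.List.pyRange_one]
  simp only [List.map_map, List.mem_map, List.mem_range]
  constructor
  · rintro ⟨j, hj, rfl⟩
    refine ⟨j, by omega, ?_⟩
    simp only [Function.comp]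
    rw [show ((0:Int) + j) = (j:Int) by omega]
    rw [show (j:Int) + k = (j:Int) + (k.toNat : Int) by omega]
    rw [PySem.List.slice_natCast_add]
  · rintro ⟨j, hj, rfl⟩
    refine ⟨j, by omega, ?_⟩
    simp only [Function.comp]
    rw [show ((0:Int) + j) = (j:Int) by omega]
    rw [show (j:Int) + k = (j:Int) + (k.toNat : Int) by omega]
    rw [PySem.List.slice_natCast_add]

-- the binary search returns max(answer, min(stop, T)) when feasibility is the threshold 'm ≤ T'
theorem bsearch_eq (stones : List Int) (k T : Int) (start stop answer : Int)
    (H : ∀ m, start ≤ m → m ≤ stop → (k ≤ goRun stones k m 0 ↔ T < m)) :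
    bsearch stones k start stop answer =
      if start ≤ stop ∧ start ≤ T then max answer (min stop T) else answer := by
  rw [bsearch]
  by_cases h : start ≤ stop
  · simp only [dif_pos h]
    have hmid := PySem.Int.floordiv_two_mid_bounds h
    set mid := PySem.Int.floordiv (start + stop) 2 with hm
    by_cases hbad : k ≤ goRun stones k mid 0
    · simp only [if_pos hbad]
      have hTm : T < mid := (H mid hmid.1 hmid.2).mp hbad
      rw [bsearch_eq stones k T start (mid - 1) answer
        (fun m h1 h2 => H m h1 (by omega))]
      split_ifs <;> omega
    · simp only [if_neg hbad]
      have hTm : mid ≤ T := by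
        by_contra hc
        exact hbad ((H mid hmid.1 hmid.2).mpr (by omega))
      rw [bsearch_eq stones k T (mid + 1) stop (max answer mid)
        (fun m h1 h2 => H m (by omega) h2)]
      split_ifs <;> omega
  · simp only [dif_neg h]
    exact (if_neg (fun hc => h hc.1)).symm
termination_by (stop + 1 - start).toNat
decreasing_by
  · have := PySem.Int.floordiv_two_mid_bounds h; omega
  · have := PySem.Int.floordiv_two_mid_bounds h; omega


-- ===== VERDICT (by name: the statement is the Claim_ definition above) =====
theorem solution_spec : Claim_equal_solution := by
  unfold Claim_equal_solution
  intro stones k _ hpre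
  unfold Spec_solution
  cases hmin : PySem.List.min? stones (fun x => x) with
  | none => exact absurd ((PySem.List.min?_eq_none_iff stones (fun x => x)).mp hmin) hpre
  | some lo =>
  cases hmax : PySem.List.max? stones (fun x => x) with
  | none => exact absurd ((PySem.List.max?_eq_none_iff stones (fun x => x)).mp hmax) hpre
  | some hi =>
  have hsol : solution stones k = bsearch stones k lo hi 0 := by
    simp [solution, hmin, hmax]
  have hlomin : ∀ y ∈ stones, lo ≤ y := PySem.List.min?_isMin hmin
  have hhimax : ∀ y ∈ stones, y ≤ hi := PySem.List.max?_isMax hmax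
  have hlohi : lo ≤ hi := hhimax lo (PySem.List.min?_mem hmin)
  have hn1 : 1 ≤ stones.length := List.length_pos_of_ne_nil hpre
  by_cases hk1 : k < 1
  · -- k < 1: every probe is infeasible, A keeps answer = 0; B returns 0
    rw [hsol, bsearch_eq stones k (lo - 1) lo hi 0 ?_]
    · rw [if_neg (by omega)]
      simp [solution_alt, if_pos hk1]
    · intro m hm _
      obtain ⟨x, t, rfl⟩ := List.exists_cons_of_ne_nil hpre
      exact ⟨fun _ => by omega, fun _ => goRun_nonpos k m (by omega) x t⟩
  · rw [not_lt] at hk1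
    by_cases hkn : k > (stones.length : Int)
    · -- k exceeds the number of stones: every probe is feasible, A returns max 0 (max stones)
      rw [hsol, bsearch_eq stones k hi lo hi 0 ?_]
      · rw [if_pos ⟨hlohi, hlohi⟩]
        simp only [solution_alt, if_neg (show ¬ k < 1 by omega), if_pos hkn, hmax,
          Option.getD_some, min_self]
      · intro m _ hm
        constructor
        · intro h
          exact absurd h (by have := goRun_short k m stones 0 le_rfl (by omega); omega)
        · intro h; omega
    · -- 1 ≤ k ≤ length: threshold = min over windows of the window max
      rw [not_lt] at hkn
      have hnz : winMaxes stones k ≠ [] := by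
        intro hc
        have := congrArg List.length hc
        simp only [winMaxes, List.length_map, PySem.List.length_pyRange_one,
          List.length_nil] at this
        omega
      cases hbest : PySem.List.min? (winMaxes stones k) (fun x => x) with
      | none => exact absurd ((PySem.List.min?_eq_none_iff (winMaxes stones k) (fun x => x)).mp hbest) hnz
      | some best =>
      have hbmem : best ∈ winMaxes stones k := PySem.List.min?_mem hbest
      have hbmin : ∀ y ∈ winMaxes stones k, best ≤ y := PySem.List.min?_isMin hbest
      -- best is a stone of the list, so lo ≤ best ≤ hi
      obtain ⟨j0, hj0, hb0⟩ := (mem_winMaxes stones k hk1 best).mp hbmem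
      obtain ⟨m0, hm0, hm0mem, _⟩ := window_max stones k hk1 j0 hj0
      have hbm0 : best = m0 := by rw [hb0, hm0, Option.getD_some]
      have hblo : lo ≤ best := hbm0 ▸ hlomin m0 hm0mem
      have hbhi : best ≤ hi := hbm0 ▸ hhimax m0 hm0mem
      rw [hsol, bsearch_eq stones k best lo hi 0 ?_]
      · rw [if_pos ⟨hlohi, hblo⟩]
        rw [alt_eq stones k hk1 hkn, hbest, Option.getD_some]
        omega
      · intro m _ _
        have hchar := goRun_char m k hk1 stones 0 le_rfl (by omega)
        rw [show k - (0:Int) = k by ring] at hchar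
        rw [hchar]
        constructor
        · rintro (h | h)
          · -- a bad prefix is a bad window at j = 0
            have hb : Bad stones m k := prefixRun_bad stones m k hk1 h
            rcases (bad_iff m k hk1 stones).mp hb with ⟨j, hj, hall⟩
            obtain ⟨mj, hmj, _, hiff⟩ := window_max stones k hk1 j hj
            have hw : (PySem.List.max? ((stones.drop j).take k.toNat) (fun x => x)).getD 0
                ∈ winMaxes stones k := (mem_winMaxes stones k hk1 _).mpr ⟨j, hj, rfl⟩
            have h1 := hbmin _ hw
            rw [hmj, Option.getD_some] at h1
            have h2 := (hiff m).mp hall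
            omega
          · rcases (bad_iff m k hk1 stones).mp h with ⟨j, hj, hall⟩
            obtain ⟨mj, hmj, _, hiff⟩ := window_max stones k hk1 j hj
            have hw : (PySem.List.max? ((stones.drop j).take k.toNat) (fun x => x)).getD 0
                ∈ winMaxes stones k := (mem_winMaxes stones k hk1 _).mpr ⟨j, hj, rfl⟩
            have h1 := hbmin _ hw
            rw [hmj, Option.getD_some] at h1
            have h2 := (hiff m).mp hall
            omega
        · intro hbm
          refine Or.inr ((bad_iff m k hk1 stones).mpr ⟨j0, hj0, ?_⟩)
          obtain ⟨mj, hmj, _, hiff⟩ := window_max stones k hk1 j0 hj0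
          refine (hiff m).mpr ?_
          rw [hmj] at hm0
          have : mj = m0 := by injection hm0
          omega
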